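-- pv_equiv track=rewrite | github.com/ALLANOSAN/APP_Download_Video_Youtube | .history/src/gui/main_window_20260308142833.py | _is_valid_url
-- ===== SOURCE A (Python) =====
-- def _is_valid_url(url: str) -> bool:
--     patterns = [
--         "youtube.com/watch",
--         "youtu.be/",
--         "youtube.com/shorts/",
--         "music.youtube.com/",
--     ]
--     return any(p in url for p in patterns)
-- ===== SOURCE B (Python) =====
-- def _is_valid_url(url: str) -> bool:
--     patterns = [
--         "youtube.com/watch",
--         "youtu.be/",
--         "youtube.com/shorts/",
--         "music.youtube.com/",
--     ]
--     for i in range(len(url) + 1):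
--         for p in patterns:
--             if url.startswith(p, i):
--                 return True
--     return False
-- ===== Notes on version B (the rewrite author's own statement) =====
-- stated objective: alternative
-- what changed: Replaces the four independent substring-membership tests (one per pattern) with a single explicit left-to-right scan over start positions that tests each pattern as a prefix at that position, returning early on the first hit.
import Mathlib
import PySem

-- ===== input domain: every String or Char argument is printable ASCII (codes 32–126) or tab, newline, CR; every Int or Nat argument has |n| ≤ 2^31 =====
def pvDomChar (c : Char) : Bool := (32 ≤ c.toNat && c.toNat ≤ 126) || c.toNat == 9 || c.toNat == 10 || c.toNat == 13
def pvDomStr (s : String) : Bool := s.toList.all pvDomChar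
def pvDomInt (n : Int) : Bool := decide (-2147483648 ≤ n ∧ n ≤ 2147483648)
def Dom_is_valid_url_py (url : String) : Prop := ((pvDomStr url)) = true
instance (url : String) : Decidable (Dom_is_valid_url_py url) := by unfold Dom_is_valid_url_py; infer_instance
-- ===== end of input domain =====

-- B replaces the four independent per-pattern substring-membership tests by one explicit scan over
-- start positions testing each pattern as a prefix there (alternative decomposition, same cost class).


-- ===== PORT A =====
-- patterns = [...] ; return any(p in url for p in patterns)
def pvPatterns : List String :=
  ["youtube.com/watch", "youtu.be/", "youtube.com/shorts/", "music.youtube.com/"]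

def is_valid_url_py (url : String) : Bool :=
  pvPatterns.any (fun p => PySem.Str.isIn p url)

-- ===== PORT B =====
-- for i in range(len(url)+1): for p in patterns: if url.startswith(p, i): return True; return False
-- url.startswith(p, i) with 0 ≤ i ≤ len(url) is exactly prefix-test on the drop-i suffix.
def is_valid_url_py_alt (url : String) : Bool :=
  (List.range (url.toList.length + 1)).any (fun i =>
    pvPatterns.any (fun p => PySem.Chars.startswith (url.toList.drop i) p.toList))

-- ===== PRECONDITION & SPEC =====
def Spec_is_valid_url_py (url : String) (out : Bool) : Prop := out = is_valid_url_py_alt url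
instance (url : String) (out : Bool) : Decidable (Spec_is_valid_url_py url out) := by unfold Spec_is_valid_url_py; infer_instance

-- ===== CLAIM (what is proved, stated in full; the proofs are below) =====
def Claim_equal_is_valid_url_py : Prop := ∀ (url : String), Dom_is_valid_url_py url → Spec_is_valid_url_py url (is_valid_url_py url)

-- ===== LEMMAS AND PROOFS =====

-- one pattern: 'p in s' holds iff p is a prefix of some suffix s.drop i with i ≤ len s
lemma isIn_iff_exists_prefix_drop_le (p s : List Char) :
    PySem.Chars.isIn p s = true ↔ ∃ i, i ≤ s.length ∧ p <+: s.drop i := by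
  rw [← PySem.Chars.exists_prefix_drop_iff_isIn]
  constructor
  · rintro ⟨j, hj⟩
    refine ⟨min j s.length, Nat.min_le_right _ _, ?_⟩
    rcases Nat.le_total j s.length with h | h
    · simpa [Nat.min_eq_left h] using hj
    · have : s.drop j = [] := List.drop_eq_nil_of_le h
      rw [this] at hj
      have hp : p = [] := List.prefix_nil.mp hj
      simp [hp]
  · rintro ⟨i, _, hi⟩
    exact ⟨i, hi⟩

-- ===== VERDICT (by name: the statement is the Claim_ definition above) =====
theorem is_valid_url_py_spec : Claim_equal_is_valid_url_py := by
  intro url _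
  unfold Spec_is_valid_url_py is_valid_url_py is_valid_url_py_alt
  rw [Bool.eq_iff_iff]
  simp only [List.any_eq_true, List.mem_range, PySem.Str.isIn_eq,
    PySem.Chars.startswith_iff, Nat.lt_succ_iff]
  constructor
  · rintro ⟨p, hp, hin⟩
    obtain ⟨i, hi, hpre⟩ := (isIn_iff_exists_prefix_drop_le p.toList url.toList).mp hin
    exact ⟨i, hi, p, hp, hpre⟩
  · rintro ⟨i, hi, p, hp, hpre⟩
    exact ⟨p, hp, (isIn_iff_exists_prefix_drop_le p.toList url.toList).mpr ⟨i, hi, hpre⟩⟩
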